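-- pv_equiv track=rewrite | github.com/boostcampaitech2/final-project-level3-nlp-02 | rouge.py | _backtrack_norec
-- ===== SOURCE A (Python) =====
-- def _backtrack_norec(t, target_tokens, prediction_tokens):
-- 	"""Read out LCS."""
-- 	i = len(target_tokens)
-- 	j = len(prediction_tokens)
-- 	lcs = []
-- 	while i > 0 and j > 0:
-- 		if target_tokens[i - 1] == prediction_tokens[j - 1]:
-- 			lcs.insert(0, i-1)
-- 			i -= 1
-- 			j -= 1
-- 		elif t[i][j - 1] > t[i - 1][j]:
-- 			j -= 1
-- 		else:
-- 			i -= 1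
-- 	return lcs
-- ===== SOURCE B (Python) =====
-- def _backtrack_norec(t, target_tokens, prediction_tokens):
--     """Read out LCS in two stages: first materialize the backtracking path of
--     table cells, then extract matched indices by spotting diagonal steps in
--     consecutive cell pairs (a match is exactly a step decreasing both
--     coordinates, so the second stage needs no token comparison)."""
--     path = [(len(target_tokens), len(prediction_tokens))]
--     while path[-1][0] > 0 and path[-1][1] > 0:
--         i, j = path[-1]
--         if target_tokens[i - 1] == prediction_tokens[j - 1]:
--             path.append((i - 1, j - 1))
--         elif t[i][j - 1] > t[i - 1][j]:
--             path.append((i, j - 1))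
--         else:
--             path.append((i - 1, j))
--     r = path[::-1]
--     return [ci for (ci, cj), (ni, nj) in zip(r, r[1:]) if ni == ci + 1 and nj == cj + 1]
-- ===== Notes on version B (the rewrite author's own statement) =====
-- stated objective: faster
-- what changed: B splits the job into two staged passes: it first materializes the whole backtracking path of table cells (append-only), then a separate comprehension over consecutive cell pairs extracts the LCS indices as the diagonal steps, instead of A's single loop that conditionally insert(0)s into an accumulator while walking.
-- outside the precondition, e.g. on _backtrack_norec([[], [0, 0], [1]], ['x', 'x'], ['y']): A returns [], B returns []
import Mathlib
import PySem

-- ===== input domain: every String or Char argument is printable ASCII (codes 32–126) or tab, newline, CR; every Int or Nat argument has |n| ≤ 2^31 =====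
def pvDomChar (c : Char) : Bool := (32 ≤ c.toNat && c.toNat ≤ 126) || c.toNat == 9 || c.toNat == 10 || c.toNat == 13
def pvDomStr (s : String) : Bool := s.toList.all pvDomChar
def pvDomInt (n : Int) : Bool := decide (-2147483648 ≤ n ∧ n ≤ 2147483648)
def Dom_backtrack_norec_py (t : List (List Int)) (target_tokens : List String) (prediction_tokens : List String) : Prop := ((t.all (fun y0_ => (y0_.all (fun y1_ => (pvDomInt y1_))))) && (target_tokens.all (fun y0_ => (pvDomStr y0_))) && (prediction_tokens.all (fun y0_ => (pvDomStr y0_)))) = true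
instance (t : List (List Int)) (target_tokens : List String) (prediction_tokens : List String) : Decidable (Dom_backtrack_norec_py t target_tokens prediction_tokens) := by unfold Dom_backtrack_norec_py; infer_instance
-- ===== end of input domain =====

-- B reads the LCS in two staged passes: it first materializes the backtracking
-- path of table cells, then extracts the matched indices as the diagonal steps.

-- ===== PORT A =====
-- the while loop of A: state (i, j, lcs); 'lcs.insert(0, i-1)' prepends, i.e. cons.
-- i, j start at the list lengths and only decrease, so target_tokens[i-1] /
-- prediction_tokens[j-1] are always in range; t[i][j-1] / t[i-1][j] are in range
-- under Pre_ below (outside it Python raises IndexError), ported with getD.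
def backtrackLoopA (t : List (List Int)) (target_tokens : List String) (prediction_tokens : List String) : Nat → Nat → List Int → List Int
  | i + 1, j + 1, lcs =>
    if target_tokens.getD i "" = prediction_tokens.getD j "" then
      backtrackLoopA t target_tokens prediction_tokens i j ((i : Int) :: lcs)
    else if (t.getD (i + 1) []).getD j 0 > (t.getD i []).getD (j + 1) 0 then
      backtrackLoopA t target_tokens prediction_tokens (i + 1) j lcs
    else
      backtrackLoopA t target_tokens prediction_tokens i (j + 1) lcs
  | _, _, lcs => lcs
  termination_by i j _ => i + j

def backtrack_norec_py (t : List (List Int)) (target_tokens : List String) (prediction_tokens : List String) : List Int :=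
  backtrackLoopA t target_tokens prediction_tokens target_tokens.length prediction_tokens.length []

-- ===== PORT B =====
-- stage 1 of B: the while loop appending cells to 'path'; ported as the obvious
-- structural recursion emitting the cells in the same (descending) order.
def backtrackPathB (t : List (List Int)) (target_tokens : List String) (prediction_tokens : List String) : Nat → Nat → List (Nat × Nat)
  | i + 1, j + 1 =>
    (i + 1, j + 1) ::
      (if target_tokens.getD i "" = prediction_tokens.getD j "" then
        backtrackPathB t target_tokens prediction_tokens i j
      else if (t.getD (i + 1) []).getD j 0 > (t.getD i []).getD (j + 1) 0 then
        backtrackPathB t target_tokens prediction_tokens (i + 1) j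
      else
        backtrackPathB t target_tokens prediction_tokens i (j + 1))
  | i, j => [(i, j)]
  termination_by i j => i + j

-- zip(r, r[1:]) of Source B: consecutive pairs
def pvPairs (r : List (Nat × Nat)) : List ((Nat × Nat) × (Nat × Nat)) := r.zip (r.drop 1)

-- stage 2 of B: r = path[::-1]; the comprehension keeping diagonal steps
def backtrack_norec_py_alt (t : List (List Int)) (target_tokens : List String) (prediction_tokens : List String) : List Int :=
  (pvPairs ((backtrackPathB t target_tokens prediction_tokens target_tokens.length prediction_tokens.length).reverse)).filterMap
    (fun p => if p.2.1 = p.1.1 + 1 ∧ p.2.2 = p.1.2 + 1 then some ((p.1.1 : Int)) else none)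

-- ===== PRECONDITION & SPEC =====
-- Pre_ excludes the inputs on which Python A raises IndexError: it requires every
-- DP-table cell the backtrack could consult to exist.  The cells the loop can visit
-- depend only on the token lists (a match forces the diagonal step, a mismatch
-- allows both the left and the up step), so pvReachCells computes that cone from
-- (len target_tokens, len prediction_tokens) and Pre_ demands t-bounds at each of
-- its mismatch cells.  This is slightly narrower than "A returns": when the actual
-- comparisons steer the walk away from a missing cell of the cone A still returns
-- — see the cite in claim.json; B returns the same value there.
def pvSuccCells (target_tokens : List String) (prediction_tokens : List String) (c : Nat × Nat) : List (Nat × Nat) :=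
  match c with
  | (i + 1, j + 1) =>
    if target_tokens.getD i "" = prediction_tokens.getD j "" then [(i, j)]
    else [(i + 1, j), (i, j + 1)]
  | _ => []

def pvReachCells (target_tokens : List String) (prediction_tokens : List String) : List (Nat × Nat) :=
  (List.range (target_tokens.length + prediction_tokens.length)).foldl
    (fun acc _ =>
      (acc.flatMap (pvSuccCells target_tokens prediction_tokens)).foldl
        (fun a c => if c ∈ a then a else a ++ [c]) acc)
    [(target_tokens.length, prediction_tokens.length)]

def Pre_backtrack_norec_py (t : List (List Int)) (target_tokens : List String) (prediction_tokens : List String) : Prop :=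
  ((pvReachCells target_tokens prediction_tokens).all (fun c =>
    match c with
    | (i + 1, j + 1) =>
      target_tokens.getD i "" = prediction_tokens.getD j "" ||
        (decide (i + 1 < t.length) && decide (j < (t.getD (i + 1) []).length)
          && decide (j + 1 < (t.getD i []).length))
    | _ => true)) = true
instance (t : List (List Int)) (target_tokens : List String) (prediction_tokens : List String) : Decidable (Pre_backtrack_norec_py t target_tokens prediction_tokens) := by unfold Pre_backtrack_norec_py; infer_instance

def pvWitness_backtrack_norec_py : List (List Int) × List String × List String :=
  ([[0, 0], [0, 1]], ["a"], ["a"])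

def Spec_backtrack_norec_py (t : List (List Int)) (target_tokens : List String) (prediction_tokens : List String) (out : List Int) : Prop := out = backtrack_norec_py_alt t target_tokens prediction_tokens
instance (t : List (List Int)) (target_tokens : List String) (prediction_tokens : List String) (out : List Int) : Decidable (Spec_backtrack_norec_py t target_tokens prediction_tokens out) := by unfold Spec_backtrack_norec_py; infer_instance

-- ===== CLAIM (what is proved, stated in full; the proofs are below) =====
def Claim_equal_backtrack_norec_py : Prop := ∀ (t : List (List Int)) (target_tokens : List String) (prediction_tokens : List String), Dom_backtrack_norec_py t target_tokens prediction_tokens → Pre_backtrack_norec_py t target_tokens prediction_tokens → Spec_backtrack_norec_py t target_tokens prediction_tokens (backtrack_norec_py t target_tokens prediction_tokens)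

-- ===== LEMMAS AND PROOFS =====
-- proof-side bridge: the ascending match list, recursively
def goAsc (t : List (List Int)) (target_tokens : List String) (prediction_tokens : List String) : Nat → Nat → List Int
  | i + 1, j + 1 =>
    if target_tokens.getD i "" = prediction_tokens.getD j "" then
      goAsc t target_tokens prediction_tokens i j ++ [(i : Int)]
    else if (t.getD (i + 1) []).getD j 0 > (t.getD i []).getD (j + 1) 0 then
      goAsc t target_tokens prediction_tokens (i + 1) j
    else
      goAsc t target_tokens prediction_tokens i (j + 1)
  | _, _ => []
  termination_by i j => i + j

theorem pvPairs_append (xs : List (Nat × Nat)) (a : Nat × Nat) :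
    pvPairs (xs ++ [a]) = pvPairs xs ++ (match xs.getLast? with
      | some b => [(b, a)]
      | none => []) := by
  induction xs with
  | nil => simp [pvPairs]
  | cons x xs ih =>
    cases xs with
    | nil => simp [pvPairs]
    | cons y ys =>
      simp only [pvPairs, List.cons_append, List.zip_cons_cons, List.drop_succ_cons,
        List.drop_zero] at *
      simpa [pvPairs] using congrArg (List.cons (x, y)) (by simpa [pvPairs] using ih)

theorem backtrackPathB_head (t : List (List Int)) (target_tokens : List String) (prediction_tokens : List String) (i j : Nat) :
    (backtrackPathB t target_tokens prediction_tokens i j).head? = some (i, j) := by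
  match i, j with
  | i + 1, j + 1 => rw [backtrackPathB]; rfl
  | 0, j => simp [backtrackPathB]
  | i + 1, 0 => simp [backtrackPathB]

theorem extract_path_eq (t : List (List Int)) (target_tokens : List String) (prediction_tokens : List String) :
    ∀ n i j, i + j ≤ n →
      (pvPairs ((backtrackPathB t target_tokens prediction_tokens i j).reverse)).filterMap
          (fun p => if p.2.1 = p.1.1 + 1 ∧ p.2.2 = p.1.2 + 1 then some ((p.1.1 : Int)) else none)
        = goAsc t target_tokens prediction_tokens i j := by
  intro n
  induction n with
  | zero =>
    intro i j hij
    have hi : i = 0 := by omega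
    subst hi
    simp [backtrackPathB, goAsc, pvPairs]
  | succ n ih =>
    intro i j hij
    match i, j with
    | 0, j => simp [backtrackPathB, goAsc, pvPairs]
    | i + 1, 0 => simp [backtrackPathB, goAsc, pvPairs]
    | i + 1, j + 1 =>
      rw [backtrackPathB, goAsc]
      split_ifs with h1 h2
      · set rest := backtrackPathB t target_tokens prediction_tokens i j with hrest
        have hlast : rest.reverse.getLast? = some (i, j) := by
          rw [List.getLast?_reverse, hrest, backtrackPathB_head]
        rw [List.reverse_cons, pvPairs_append, hlast, List.filterMap_append]
        have := ih i j (by omega)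
        rw [this]
        simp
      · set rest := backtrackPathB t target_tokens prediction_tokens (i + 1) j with hrest
        have hlast : rest.reverse.getLast? = some (i + 1, j) := by
          rw [List.getLast?_reverse, hrest, backtrackPathB_head]
        rw [List.reverse_cons, pvPairs_append, hlast, List.filterMap_append]
        have := ih (i + 1) j (by omega)
        rw [this]
        simp
      · set rest := backtrackPathB t target_tokens prediction_tokens i (j + 1) with hrest
        have hlast : rest.reverse.getLast? = some (i, j + 1) := by
          rw [List.getLast?_reverse, hrest, backtrackPathB_head]
        rw [List.reverse_cons, pvPairs_append, hlast, List.filterMap_append]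
        have := ih i (j + 1) (by omega)
        rw [this]
        simp

-- loop invariant: A's accumulator loop equals the ascending match list followed by the accumulator
theorem backtrackLoopA_eq (t : List (List Int)) (target_tokens : List String) (prediction_tokens : List String) :
    ∀ n i j, i + j ≤ n → ∀ (lcs : List Int),
      backtrackLoopA t target_tokens prediction_tokens i j lcs
        = goAsc t target_tokens prediction_tokens i j ++ lcs := by
  intro n
  induction n with
  | zero =>
    intro i j hij lcs
    have hi : i = 0 := by omega
    subst hi
    simp [backtrackLoopA, goAsc]
  | succ n ih =>
    intro i j hij lcs
    match i, j with
    | 0, j => simp [backtrackLoopA, goAsc]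
    | i + 1, 0 => simp [backtrackLoopA, goAsc]
    | i + 1, j + 1 =>
      rw [backtrackLoopA, goAsc]
      split_ifs with h1 h2
      · have := ih i j (by omega) ((i : Int) :: lcs)
        simpa using this
      · exact ih (i + 1) j (by omega) lcs
      · exact ih i (j + 1) (by omega) lcs

-- ===== VERDICT (by name: the statement is the Claim_ definition above) =====
theorem backtrack_norec_py_spec : Claim_equal_backtrack_norec_py := by
  intro t target_tokens prediction_tokens _ _
  unfold Spec_backtrack_norec_py backtrack_norec_py backtrack_norec_py_alt
  rw [extract_path_eq t target_tokens prediction_tokens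
      (target_tokens.length + prediction_tokens.length)
      target_tokens.length prediction_tokens.length le_rfl]
  simpa using backtrackLoopA_eq t target_tokens prediction_tokens
      (target_tokens.length + prediction_tokens.length)
      target_tokens.length prediction_tokens.length le_rfl []
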